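-- pv_equiv track=rewrite | github.com/momo1606/Takhteet | takhteet/myiter.py | to_arab
-- ===== SOURCE A (Python) =====
-- def to_arab(q):
--     def enToArNumb(number):
--         dic = {
--             0:'۰',
--             1:'١',
--             2:'٢',
--             3:'۳',
--             4:'٤',
--             5:'۵',
--             6:'٦',
--             7:'۷',
--             8:'۸',
--             9:'۹',
--         }
--         return dic.get(number)
--     fin=""
--     while(q>0):
--         a=q%10
--         q=q//10
--         l=enToArNumb(a)
--         fin=fin+l
--     return (fin[::-1])
-- ===== SOURCE B (Python) =====
-- _AR = ('\u06f0', '\u0661', '\u0662', '\u06f3', '\u0664', '\u06f5',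
--        '\u0666', '\u06f7', '\u06f8', '\u06f9')
--
--
-- def _digits(q):
--     # decimal digits of q, high-to-low; [] for q <= 0
--     return _digits(q // 10) + [q % 10] if q > 0 else []
--
--
-- def to_arab(q):
--     return "".join(_AR[d] for d in _digits(q))
-- ===== Notes on version B (the rewrite author's own statement) =====
-- stated objective: alternative
-- what changed: Replaces A's while-loop that accumulates Arabic characters low-to-high through a dict and then reverses the string by two staged passes: a recursion producing the digit list high-to-low, then a tuple-indexed lookup joined into the result, so no string reversal or dict is needed.
import Mathlib
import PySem

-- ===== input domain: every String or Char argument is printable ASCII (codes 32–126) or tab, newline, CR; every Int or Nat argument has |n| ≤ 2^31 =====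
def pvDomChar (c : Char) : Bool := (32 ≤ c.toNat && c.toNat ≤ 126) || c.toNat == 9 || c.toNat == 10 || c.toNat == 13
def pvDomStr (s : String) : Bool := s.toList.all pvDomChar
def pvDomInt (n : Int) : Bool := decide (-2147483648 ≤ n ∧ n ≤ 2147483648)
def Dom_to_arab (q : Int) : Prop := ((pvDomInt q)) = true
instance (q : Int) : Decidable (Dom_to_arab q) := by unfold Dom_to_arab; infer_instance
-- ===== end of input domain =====

-- B replaces A's low-to-high while-loop accumulator with dict lookups plus final fin[::-1]
-- reversal by two staged passes: a recursion producing the digit list high-to-low, then a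
-- tuple-indexed lookup joined into the result (objective: alternative).

-- ===== PORT A =====
-- the inner dict of A's enToArNumb
def arabDicA : PySem.Dict Int String :=
  PySem.Dict.ofList [((0:Int), "۰"), (1, "١"), (2, "٢"), (3, "۳"), (4, "٤"),
   (5, "۵"), (6, "٦"), (7, "۷"), (8, "۸"), (9, "۹")]

def enToArNumb (number : Int) : Option String := PySem.Dict.get? arabDicA number

-- termination helper for both recursions, cited in decreasing_by
theorem pvFloordiv10_toNat_lt (q : Int) (h : q > 0) :
    (PySem.Int.floordiv q 10).toNat < q.toNat := by
  rw [PySem.Int.floordiv_eq_ediv_of_pos (by norm_num)]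
  omega

-- the while-loop: fin is the accumulator; l = enToArNumb a is always some, since
-- 0 ≤ q % 10 ≤ 9 when q > 0 ('.getD ""' is never the default on reachable inputs)
def toArabLoop (q : Int) (fin : String) : String :=
  if q > 0 then
    let a := PySem.Int.mod q 10
    let q' := PySem.Int.floordiv q 10
    let l := (enToArNumb a).getD ""
    toArabLoop q' (fin ++ l)
  else fin
termination_by q.toNat
decreasing_by exact pvFloordiv10_toNat_lt q (by assumption)

def to_arab (q : Int) : String :=
  (PySem.Str.slice? (toArabLoop q "") none none (-1)).getD ""

-- ===== PORT B =====
-- the tuple _AR of Source B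
def arTable : List String := ["۰", "١", "٢", "۳", "٤", "۵", "٦", "۷", "۸", "۹"]

-- _digits: decimal digits of q, high-to-low; [] for q <= 0
def arDigits (q : Int) : List Int :=
  if q > 0 then arDigits (PySem.Int.floordiv q 10) ++ [PySem.Int.mod q 10] else []
termination_by q.toNat
decreasing_by exact pvFloordiv10_toNat_lt q (by assumption)

-- _AR[d] is always in range since every digit lies in 0..9 ('.getD ""' never fires)
def to_arab_alt (q : Int) : String :=
  PySem.Str.join "" ((arDigits q).map fun d => (PySem.List.pyGet? arTable d).getD "")

-- ===== PRECONDITION & SPEC =====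
def Spec_to_arab (q : Int) (out : String) : Prop := out = to_arab_alt q
instance (q : Int) (out : String) : Decidable (Spec_to_arab q out) := by unfold Spec_to_arab; infer_instance

-- ===== CLAIM (what is proved, stated in full; the proofs are below) =====
def Claim_equal_to_arab : Prop := ∀ (q : Int), Dom_to_arab q → Spec_to_arab q (to_arab q)

-- ===== LEMMAS AND PROOFS =====

theorem arab_digit_rev (d : Int) (h0 : 0 ≤ d) (h9 : d < 10) :
    ((enToArNumb d).getD "").toList.reverse = ((PySem.List.pyGet? arTable d).getD "").toList := by
  interval_cases d <;> decide

theorem mod10_bounds (q : Int) : 0 ≤ PySem.Int.mod q 10 ∧ PySem.Int.mod q 10 < 10 := by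
  rw [PySem.Int.mod_eq_emod_of_pos (by norm_num)]
  exact ⟨Int.emod_nonneg q (by norm_num), Int.emod_lt_of_pos q (by norm_num)⟩

-- accumulator generalisation: the loop appends to fin on the left
theorem toArabLoop_acc_aux (n : Nat) (q : Int) (hn : q.toNat ≤ n) (fin : String) :
    (toArabLoop q fin).toList = fin.toList ++ (toArabLoop q "").toList := by
  induction n generalizing q fin with
  | zero =>
      have hq : ¬ q > 0 := by omega
      rw [toArabLoop, if_neg hq]
      conv_rhs => rw [toArabLoop, if_neg hq]
      simp
  | succ n ih =>
      by_cases hq : q > 0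
      · have hlt := pvFloordiv10_toNat_lt q hq
        conv_rhs => rw [toArabLoop, if_pos hq]
        rw [toArabLoop, if_pos hq]
        rw [ih _ (by omega) (fin ++ _), ih _ (by omega) ("" ++ _)]
        simp
      · rw [toArabLoop, if_neg hq]
        conv_rhs => rw [toArabLoop, if_neg hq]
        simp

theorem toArabLoop_acc (q : Int) (fin : String) :
    (toArabLoop q fin).toList = fin.toList ++ (toArabLoop q "").toList :=
  toArabLoop_acc_aux q.toNat q le_rfl fin

-- joining with the empty separator is concatenation
theorem join_empty_eq_flatten (L : List (List Char)) :
    PySem.Chars.join [] L = L.flatten := by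
  induction L with
  | nil => simp [PySem.Chars.join, List.intercalate]
  | cons a l ih =>
      cases l with
      | nil => simp [PySem.Chars.join, List.intercalate]
      | cons b l' =>
          simp only [PySem.Chars.join, List.intercalate] at ih ⊢
          simp [List.intersperse, ih]

theorem alt_toList (q : Int) :
    (to_arab_alt q).toList =
      ((arDigits q).map fun d => ((PySem.List.pyGet? arTable d).getD "").toList).flatten := by
  rw [to_arab_alt, PySem.Str.toList_join]
  rw [show ("" : String).toList = [] from rfl, join_empty_eq_flatten]
  rw [List.map_map]; rfl

theorem loop_reverse_eq_alt (q : Int) :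
    (toArabLoop q "").toList.reverse = (to_arab_alt q).toList := by
  induction q using arDigits.induct with
  | case1 q hq ih =>
      obtain ⟨h0, h9⟩ := mod10_bounds q
      rw [toArabLoop, if_pos hq]
      rw [alt_toList, arDigits, if_pos hq]
      rw [toArabLoop_acc]
      rw [alt_toList] at ih
      simp only [List.map_append, List.flatten_append, List.reverse_append, ih,
        List.map_cons, List.map_nil, List.flatten_cons, List.flatten_nil]
      have hd := arab_digit_rev _ h0 h9
      rw [show PySem.Int.mod q 10 = q % 10 from PySem.Int.mod_eq_emod_of_pos (by norm_num)] at hd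
      simp [hd]
  | case2 q hq =>
      rw [toArabLoop, if_neg hq, alt_toList, arDigits, if_neg hq]
      rfl

-- ===== VERDICT (by name: the statement is the Claim_ definition above) =====
theorem to_arab_spec : Claim_equal_to_arab := by
  intro q _
  show to_arab q = to_arab_alt q
  rw [to_arab, PySem.Str.slice?_none_none_neg_one]
  simp only [Option.getD_some]
  rw [loop_reverse_eq_alt]
  apply String.ext
  simp [String.ofList]
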